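-- pv_equiv track=rewrite | github.com/Jakeminator123/full_scraper | scraper.py | _iter_prefixes
-- ===== SOURCE A (Python) =====
-- from typing import Generator
--
-- def _iter_prefixes(resume_prefix: str = "") -> Generator[str, None, None]:
--     """Yield all 3-letter prefixes AAA..ZZZ, optionally resuming."""
--     started = not bool(resume_prefix)
--     for a in range(26):
--         for b in range(26):
--             for c in range(26):
--                 prefix = chr(65+a) + chr(65+b) + chr(65+c)
--                 if not started:
--                     if prefix == resume_prefix:
--                         started = True
--                     continue
--                 yield prefix
-- ===== SOURCE B (Python) =====
-- def _iter_prefixes(resume_prefix: str = ""):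
--     """Yield all 3-letter prefixes AAA..ZZZ, optionally resuming."""
--     if not resume_prefix:
--         start = 0
--     elif len(resume_prefix) == 3 and all('A' <= ch <= 'Z' for ch in resume_prefix):
--         v = 0
--         for ch in resume_prefix:
--             v = v * 26 + (ord(ch) - 65)
--         start = v + 1
--     else:
--         start = 26 ** 3
--     for i in range(start, 26 ** 3):
--         i2, c = divmod(i, 26)
--         a, b = divmod(i2, 26)
--         yield chr(65 + a) + chr(65 + b) + chr(65 + c)
-- ===== Notes on version B (the rewrite author's own statement) =====
-- stated objective: alternative
-- what changed: B replaces A's triple nested loop that scans all 26^3 prefixes while toggling a resume flag by a closed-form base-26 start index computed from resume_prefix (0 if empty, value+1 if a valid 3-uppercase prefix, 26^3 otherwise) followed by a single range loop that decodes each index back to letters with divmod.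
import Mathlib
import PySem

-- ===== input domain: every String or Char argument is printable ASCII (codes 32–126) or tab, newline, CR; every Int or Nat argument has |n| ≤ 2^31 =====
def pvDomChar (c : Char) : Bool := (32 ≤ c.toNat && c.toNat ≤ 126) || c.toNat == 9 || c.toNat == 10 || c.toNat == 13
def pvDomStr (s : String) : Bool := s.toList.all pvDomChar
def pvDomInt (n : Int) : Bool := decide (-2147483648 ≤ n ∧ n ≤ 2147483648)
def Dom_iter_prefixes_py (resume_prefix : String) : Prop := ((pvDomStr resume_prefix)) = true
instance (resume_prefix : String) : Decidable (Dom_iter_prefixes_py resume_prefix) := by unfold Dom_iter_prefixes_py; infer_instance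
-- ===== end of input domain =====

-- B replaces A's scan-and-flag over all 26^3 prefixes by a closed-form base-26 start
-- index plus a single divmod decoding loop over range(start, 26**3); objective: alternative.

-- ===== PORT A =====
-- prefix = chr(65+a) + chr(65+b) + chr(65+c)
def pfxA (a b c : Nat) : String :=
  String.ofList [Char.ofNat (65 + a), Char.ofNat (65 + b), Char.ofNat (65 + c)]

-- the index triples visited by A's three nested 'for … in range(26)' loops, in order
def tripleList : List (Nat × Nat × Nat) :=
  (List.range 26).flatMap fun a =>
    (List.range 26).flatMap fun b =>
      (List.range 26).map fun c => (a, b, c)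

-- the generator body: recursion over the remaining triples, 'started' as parameter;
-- same branch order as A ('if not started: if prefix == resume: started = True; continue')
def genA (r : String) : Bool → List (Nat × Nat × Nat) → List String
  | _, [] => []
  | started, (a, b, c) :: rest =>
    let p := pfxA a b c
    if started = false then
      (if p = r then genA r true rest else genA r started rest)
    else p :: genA r started rest

def iter_prefixes_py (resume_prefix : String) : List String :=
  genA resume_prefix (decide (resume_prefix.toList = [])) tripleList

-- ===== PORT B =====
-- yield chr(65+a)+chr(65+b)+chr(65+c) where a,b,c come from divmod(i, 26) twice
def enc3 (i : Nat) : String :=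
  String.ofList [Char.ofNat (65 + i / 26 / 26), Char.ofNat (65 + i / 26 % 26), Char.ofNat (65 + i % 26)]

-- 'A' <= ch <= 'Z'
def okChar (c : Char) : Bool := decide ('A' ≤ c) && decide (c ≤ 'Z')

-- start = 0 | v+1 | 26**3 as in Source B (the base-26 accumulation over the three chars, unrolled)
def startIdx (r : String) : Nat :=
  match r.toList with
  | [] => 0
  | [x, y, z] =>
      if okChar x && okChar y && okChar z then
        ((x.toNat - 65) * 26 + (y.toNat - 65)) * 26 + (z.toNat - 65) + 1
      else 17576
  | _ => 17576

-- for i in range(start, 26**3): yield enc3(i)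
def iter_prefixes_py_alt (resume_prefix : String) : List String :=
  (List.range' (startIdx resume_prefix) (17576 - startIdx resume_prefix)).map enc3

-- ===== PRECONDITION & SPEC =====
def Spec_iter_prefixes_py (resume_prefix : String) (out : List String) : Prop := out = iter_prefixes_py_alt resume_prefix
instance (resume_prefix : String) (out : List String) : Decidable (Spec_iter_prefixes_py resume_prefix out) := by unfold Spec_iter_prefixes_py; infer_instance

-- ===== CLAIM (what is proved, stated in full; the proofs are below) =====
def Claim_equal_iter_prefixes_py : Prop := ∀ (resume_prefix : String), Dom_iter_prefixes_py resume_prefix → Spec_iter_prefixes_py resume_prefix (iter_prefixes_py resume_prefix)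

-- ===== LEMMAS AND PROOFS =====

theorem toNat_ofNat_small (n : Nat) (h : n ≤ 200) : (Char.ofNat n).toNat = n := by
  rw [Char.toNat_ofNat, if_pos]; left; omega

theorem char_le_iff (c d : Char) : (c ≤ d) ↔ c.toNat ≤ d.toNat := by
  rw [Char.le_def]; rfl

theorem okChar_bounds (c : Char) (h : okChar c = true) : 65 ≤ c.toNat ∧ c.toNat ≤ 90 := by
  simp only [okChar, Bool.and_eq_true, decide_eq_true_eq] at h
  rw [char_le_iff] at h
  rw [char_le_iff] at h
  exact h

theorem okChar_of_bounds (c : Char) (h1 : 65 ≤ c.toNat) (h2 : c.toNat ≤ 90) : okChar c = true := by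
  simp only [okChar, Bool.and_eq_true, decide_eq_true_eq]
  rw [char_le_iff, char_le_iff]
  exact ⟨h1, h2⟩

theorem decide_cons (x : Char) (l : List Char) : (decide ((x :: l : List Char) = [])) = false := by
  simp

theorem range_mul_map {α : Type} (m n : Nat) (f : Nat → α) :
    (List.range (m * n)).map f
      = (List.range m).flatMap (fun a => (List.range n).map fun b => f (n * a + b)) := by
  induction m with
  | zero => simp
  | succ m ih =>
    rw [show (m + 1) * n = m * n + n by ring, List.range_add, List.map_append,
        List.range_succ, List.flatMap_append, ih]
    simp [List.map_map, Function.comp, Nat.mul_comm]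

theorem enc3_toList (i : Nat) :
    (enc3 i).toList = [Char.ofNat (65 + i / 26 / 26), Char.ofNat (65 + i / 26 % 26), Char.ofNat (65 + i % 26)] := by
  simp [enc3]

theorem pfx_enc (a b c : Nat) (hb : b < 26) (hc : c < 26) :
    pfxA a b c = enc3 (676 * a + (26 * b + c)) := by
  unfold pfxA enc3
  have h1 : (676 * a + (26 * b + c)) / 26 / 26 = a := by omega
  have h2 : (676 * a + (26 * b + c)) / 26 % 26 = b := by omega
  have h3 : (676 * a + (26 * b + c)) % 26 = c := by omega
  rw [h1, h2, h3]

theorem Lall_flat :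
    (List.range 17576).map enc3
      = (List.range 26).flatMap (fun a => (List.range 26).flatMap fun b =>
          (List.range 26).map fun c => enc3 (676 * a + (26 * b + c))) := by
  have h0 := range_mul_map 26 676 enc3
  rw [show (26 * 676 : Nat) = 17576 by norm_num] at h0
  have h2 : ∀ a : Nat, (List.range 676).map (fun b => enc3 (676 * a + b))
      = (List.range 26).flatMap fun b => (List.range 26).map fun c => enc3 (676 * a + (26 * b + c)) := by
    intro a
    have h := range_mul_map 26 26 (fun b => enc3 (676 * a + b))
    rw [show (26 * 26 : Nat) = 676 by norm_num] at h
    exact h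
  rw [h0]
  simp only [h2]

-- the prefix A builds from an index triple
def pfxF (t : Nat × Nat × Nat) : String := pfxA t.1 t.2.1 t.2.2

-- A's generator at string level (helper for the proofs)
def scanS (r : String) : Bool → List String → List String
  | _, [] => []
  | true, p :: rest => p :: scanS r true rest
  | false, p :: rest => if p = r then scanS r true rest else scanS r false rest

theorem gen_eq_scan (r : String) (fl : Bool) (L : List (Nat × Nat × Nat)) :
    genA r fl L = scanS r fl (L.map pfxF) := by
  induction L generalizing fl with
  | nil => cases fl <;> rfl
  | cons t rest ih =>
    obtain ⟨a, b, c⟩ := t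
    cases fl with
    | true => simp [genA, scanS, pfxF, ih]
    | false =>
      simp only [genA, List.map_cons, scanS, pfxF]
      by_cases h : pfxA a b c = r
      · simp [h, ih]
      · simp [h, ih]

theorem scan_true (r : String) (M : List String) : scanS r true M = M := by
  induction M with
  | nil => rfl
  | cons p rest ih => simp [scanS, ih]

theorem scan_false_notmem (r : String) (M : List String) (h : r ∉ M) :
    scanS r false M = [] := by
  induction M with
  | nil => rfl
  | cons p rest ih =>
    simp only [List.mem_cons, not_or] at h
    rw [scanS, if_neg (fun hpr => h.1 hpr.symm)]
    exact ih h.2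

theorem scan_append_false (r : String) (M1 M2 : List String) (h : r ∉ M1) :
    scanS r false (M1 ++ M2) = scanS r false M2 := by
  induction M1 with
  | nil => rfl
  | cons p rest ih =>
    simp only [List.mem_cons, not_or] at h
    rw [List.cons_append, scanS, if_neg (fun hpr => h.1 hpr.symm)]
    exact ih h.2

theorem scan_found (r : String) (M1 M2 : List String) (h : r ∉ M1) :
    scanS r false (M1 ++ r :: M2) = M2 := by
  rw [scan_append_false r M1 _ h, scanS, if_pos rfl, scan_true]

theorem flatMap_congr_mem {α β : Type} (l : List α) (f g : α → List β)
    (h : ∀ x ∈ l, f x = g x) : l.flatMap f = l.flatMap g := by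
  induction l with
  | nil => rfl
  | cons a t ih =>
    rw [List.flatMap_cons, List.flatMap_cons, h a (by simp), ih (fun x hx => h x (by simp [hx]))]

theorem tripleMap_eq_Lall : tripleList.map pfxF = (List.range 17576).map enc3 := by
  rw [Lall_flat]
  unfold tripleList
  rw [List.map_flatMap]
  apply flatMap_congr_mem
  intro a _
  rw [List.map_flatMap]
  apply flatMap_congr_mem
  intro b hb
  rw [List.map_map]
  apply List.map_congr_left
  intro c hc
  simp only [Function.comp_apply, pfxF]
  exact pfx_enc a b c (List.mem_range.mp hb) (List.mem_range.mp hc)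

theorem enc3_inj (i j : Nat) (hi : i < 17576) (hj : j < 17576) (h : enc3 i = enc3 j) : i = j := by
  have hl := congrArg String.toList h
  rw [enc3_toList, enc3_toList] at hl
  simp only [List.cons.injEq, and_true] at hl
  obtain ⟨h1, h2, h3⟩ := hl
  have e1 := congrArg Char.toNat h1
  have e2 := congrArg Char.toNat h2
  have e3 := congrArg Char.toNat h3
  rw [toNat_ofNat_small _ (by omega), toNat_ofNat_small _ (by omega)] at e1
  rw [toNat_ofNat_small _ (by omega), toNat_ofNat_small _ (by omega)] at e2
  rw [toNat_ofNat_small _ (by omega), toNat_ofNat_small _ (by omega)] at e3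
  omega

theorem Lall_split (j : Nat) (hj : j < 17576) :
    (List.range 17576).map enc3
      = (List.range j).map enc3 ++ enc3 j :: (List.range' (j + 1) (17576 - (j + 1))).map enc3 := by
  rw [show (17576 : Nat) = j + ((17576 - (j + 1)) + 1) by omega, List.range_add, List.map_append]
  congr 1
  rw [List.range_succ_eq_map]
  simp only [List.map_cons, Nat.add_zero, List.map_map, List.range'_eq_map_range]
  congr 1
  rw [show j + (17576 - (j + 1) + 1) - (j + 1) = 17576 - (j + 1) by omega]
  apply List.map_congr_left
  intro x _
  simp only [Function.comp_apply]
  have hx : j + Nat.succ x = j + 1 + x := by omega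
  rw [hx]

theorem notmem_of_len (r : String) (h : r.toList.length ≠ 3) :
    r ∉ (List.range 17576).map enc3 := by
  intro hm
  obtain ⟨i, _, hei⟩ := List.mem_map.mp hm
  apply h
  rw [← hei, enc3_toList]
  rfl

theorem main_eq (r : String) : iter_prefixes_py r = iter_prefixes_py_alt r := by
  unfold iter_prefixes_py
  rw [gen_eq_scan, tripleMap_eq_Lall]
  unfold iter_prefixes_py_alt
  rcases hl : r.toList with _ | ⟨x, _ | ⟨y, _ | ⟨z, _ | ⟨d, t⟩⟩⟩⟩
  · -- resume_prefix == "": everything is yielded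
    rw [show (decide (([] : List Char) = [])) = true by rfl, scan_true]
    have hs : startIdx r = 0 := by simp [startIdx, hl]
    rw [hs]
    norm_num [List.range_eq_range']
  · -- length 1: never matches, nothing yielded
    rw [decide_cons, scan_false_notmem _ _ (notmem_of_len r (by rw [hl]; simp))]
    have hs : startIdx r = 17576 := by simp [startIdx, hl]
    rw [hs]
    simp
  · -- length 2
    rw [decide_cons, scan_false_notmem _ _ (notmem_of_len r (by rw [hl]; simp))]
    have hs : startIdx r = 17576 := by simp [startIdx, hl]
    rw [hs]
    simp
  · -- length 3
    by_cases hok : (okChar x && okChar y && okChar z) = true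
    · -- valid uppercase prefix: yield everything strictly after it
      simp only [Bool.and_eq_true] at hok
      obtain ⟨hx1, hx2⟩ := okChar_bounds x hok.1.1
      obtain ⟨hy1, hy2⟩ := okChar_bounds y hok.1.2
      obtain ⟨hz1, hz2⟩ := okChar_bounds z hok.2
      set j : Nat := ((x.toNat - 65) * 26 + (y.toNat - 65)) * 26 + (z.toNat - 65) with hjdef
      have hj : j < 17576 := by omega
      have hrj : r = enc3 j := by
        have hr : r = String.ofList [x, y, z] := by rw [← hl]; simp
        rw [hr]
        unfold enc3
        have d1 : j / 26 / 26 = x.toNat - 65 := by omega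
        have d2 : j / 26 % 26 = y.toNat - 65 := by omega
        have d3 : j % 26 = z.toNat - 65 := by omega
        rw [d1, d2, d3,
            show 65 + (x.toNat - 65) = x.toNat by omega, Char.ofNat_toNat,
            show 65 + (y.toNat - 65) = y.toNat by omega, Char.ofNat_toNat,
            show 65 + (z.toNat - 65) = z.toNat by omega, Char.ofNat_toNat]
      have hnm : r ∉ (List.range j).map enc3 := by
        intro hm
        obtain ⟨i, hi, hei⟩ := List.mem_map.mp hm
        have hi' := List.mem_range.mp hi
        have : i = j := enc3_inj i j (by omega) hj (by rw [hei, hrj])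
        omega
      rw [decide_cons, Lall_split j hj, show enc3 j = r from hrj.symm, scan_found _ _ _ hnm]
      have hs : startIdx r = j + 1 := by
        simp [startIdx, hl, hok.1.1, hok.1.2, hok.2]
        exact hjdef.symm
      rw [hs]
    · -- 3 chars but not all uppercase A..Z: never matches, nothing yielded
      have hnm : r ∉ (List.range 17576).map enc3 := by
        intro hm
        obtain ⟨i, hi, hei⟩ := List.mem_map.mp hm
        have hi' := List.mem_range.mp hi
        have hxyz := congrArg String.toList hei
        rw [enc3_toList, hl] at hxyz
        simp only [List.cons.injEq, and_true] at hxyz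
        obtain ⟨e1, e2, e3⟩ := hxyz
        apply hok
        rw [← e1, ← e2, ← e3]
        simp only [Bool.and_eq_true]
        refine ⟨⟨?_, ?_⟩, ?_⟩ <;>
          exact okChar_of_bounds _ (by rw [toNat_ofNat_small _ (by omega)]; omega)
            (by rw [toNat_ofNat_small _ (by omega)]; omega)
      rw [decide_cons, scan_false_notmem _ _ hnm]
      have hs : startIdx r = 17576 := by simp [startIdx, hl, hok]
      rw [hs]
      simp
  · -- length ≥ 4
    rw [decide_cons, scan_false_notmem _ _ (notmem_of_len r (by rw [hl]; simp))]
    have hs : startIdx r = 17576 := by simp [startIdx, hl]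
    rw [hs]
    simp

-- ===== VERDICT (by name: the statement is the Claim_ definition above) =====
theorem iter_prefixes_py_spec : Claim_equal_iter_prefixes_py := by
  unfold Claim_equal_iter_prefixes_py Spec_iter_prefixes_py
  intro r _
  exact main_eq r
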